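-- pv_equiv track=rewrite | github.com/JasonZuu/MedCoE-private | vocab/vocab_modify_tpe.py | repair_vocab_new
-- ===== SOURCE A (Python) =====
-- from collections import defaultdict, Counter, OrderedDict
-- from typing import Optional, Dict, List, Tuple
-- from typing import Dict, Tuple, List
-- from collections import defaultdict
--
-- def repair_vocab_new(
--     vocab_new: Dict[str, int],
--     vocab_old: Dict[str, int]
-- ) -> Tuple[Dict[str, int], Dict[int, List[str]]]:
--     """
--     修复 vocab_new 中的两类问题：
--       1) 重复 ID：只保留每个 ID 对应的第一个 token，并统计被移除的重复 token
--       2) 缺失 ID（holes）：用 vocab_old 对应的 token 填回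
--
--     Args:
--         vocab_new:  经过增删改后可能有“洞”或重复 ID 的词表 mapping token->id
--         vocab_old:  原始完整词表 mapping token->id
--
--     Returns:
--         repaired:   修补完毕的 vocab_new mapping token->id
--         duplicates: 重复 ID 的统计 dict，形如 {id: [tok_removed1, tok_removed2, ...], ...}
--     """
--     # 1. 反向映射 vocab_new: id -> [tokens]
--     id_to_tokens = defaultdict(list)
--     for tok, tid in vocab_new.items():
--         id_to_tokens[tid].append(tok)
--
--     repaired = {}
--     duplicates: Dict[int, List[str]] = {}
--
--     # 2. 对每个 id，保留第一遇到的 token，记录其余为重复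
--     for tid, toks in id_to_tokens.items():
--         # 保留第一个
--         first_tok = toks[0]
--         repaired[first_tok] = tid
--         # 如果有多余，就记录这些被移除的 duplicates
--         if len(toks) > 1:
--             duplicates[tid] = toks[1:]
--
--     # 3. 找出缺失 ID（holes）并用 vocab_old 补回
--     #    只在 [0..max_old_id] 范围内补
--     if vocab_old:
--         # 建立反向 old 映射
--         id_to_old = {tid: tok for tok, tid in vocab_old.items()}
--         max_old_id = max(id_to_old.keys())
--
--         used_ids = set(repaired.values())
--         holes = [i for i in range(max_old_id + 1) if i not in used_ids]
--
--         for hid in holes: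
--             old_tok = id_to_old.get(hid)
--             if old_tok and old_tok not in repaired:
--                 repaired[old_tok] = hid
--
--     return repaired
-- ===== SOURCE B (Python) =====
-- def repair_vocab_new(vocab_new, vocab_old):
--     # Single pass: keep the first token seen for each id; then fill holes from vocab_old.
--     repaired = {}
--     seen = set()
--     for tok, tid in vocab_new.items():
--         if tid not in seen:
--             repaired[tok] = tid
--             seen.add(tid)
--
--     if vocab_old:
--         id_to_old = {tid: tok for tok, tid in vocab_old.items()}
--         max_old_id = max(id_to_old)
--         used_ids = set(repaired.values())
--         for hid in range(max_old_id + 1):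
--             if hid in used_ids:
--                 continue
--             old_tok = id_to_old.get(hid)
--             if old_tok and old_tok not in repaired:
--                 repaired[old_tok] = hid
--     return repaired
-- ===== Notes on version B (the rewrite author's own statement) =====
-- stated objective: simpler
-- what changed: A's group-by-id table plus a second extraction pass (and the never-returned duplicates dict) are collapsed into one pass over vocab_new with a seen-id set, and the separate holes-list construction is merged into the fill loop.
import Mathlib
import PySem

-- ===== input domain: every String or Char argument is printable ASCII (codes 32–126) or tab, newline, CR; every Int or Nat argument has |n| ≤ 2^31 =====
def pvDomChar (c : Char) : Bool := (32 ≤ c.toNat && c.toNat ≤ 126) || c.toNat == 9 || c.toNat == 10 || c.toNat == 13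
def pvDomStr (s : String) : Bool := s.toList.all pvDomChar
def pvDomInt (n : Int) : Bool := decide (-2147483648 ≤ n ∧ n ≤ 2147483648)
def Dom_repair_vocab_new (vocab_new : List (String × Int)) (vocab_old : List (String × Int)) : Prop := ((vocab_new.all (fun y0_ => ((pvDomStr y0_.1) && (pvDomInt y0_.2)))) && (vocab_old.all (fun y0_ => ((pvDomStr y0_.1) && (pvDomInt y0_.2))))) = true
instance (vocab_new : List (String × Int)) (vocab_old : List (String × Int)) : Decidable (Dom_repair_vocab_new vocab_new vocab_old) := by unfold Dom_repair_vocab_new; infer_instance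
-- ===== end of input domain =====

-- B collapses A's group-by-id table + second pass into one single pass keeping the first token per id,
-- and merges A's hole-list construction into the fill loop (objective: simpler; return value only).


-- ===== PORT A =====
-- id_to_tokens[tid].append(tok)  (defaultdict(list))
def pvGroupStep (d : PySem.Dict Int (List String)) (p : String × Int) : PySem.Dict Int (List String) :=
  d.modify p.2 [] (· ++ [p.1])

-- one step of A's second loop: repaired[first_tok] = tid; if len(toks) > 1: duplicates[tid] = toks[1:]
def pvAStep (s : PySem.Dict String Int × PySem.Dict Int (List String)) (q : Int × List String) :
    PySem.Dict String Int × PySem.Dict Int (List String) :=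
  (s.1.insert (PySem.List.pyGetD q.2 0 "") q.1,
   if 1 < PySem.List.len q.2 then s.2.insert q.1 (PySem.List.slice q.2 (some 1) none) else s.2)

-- one step of the hole-filling loop (identical lines in A and B):
-- old_tok = id_to_old.get(hid); if old_tok and old_tok not in repaired: repaired[old_tok] = hid
def pvFill (id_to_old : PySem.Dict Int String) (r : PySem.Dict String Int) (hid : Int) :
    PySem.Dict String Int :=
  match id_to_old.get? hid with
  | none => r
  | some tok => if tok.toList ≠ [] ∧ r.contains tok = false then r.insert tok hid else r

def repair_vocab_new (vocab_new : List (String × Int)) (vocab_old : List (String × Int)) :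
    List (String × Int) :=
  let id_to_tokens : PySem.Dict Int (List String) := vocab_new.foldl pvGroupStep PySem.Dict.empty
  let rd := id_to_tokens.items.foldl pvAStep (PySem.Dict.empty, PySem.Dict.empty)
  let repaired := rd.1   -- rd.2 is A's `duplicates`, computed but not returned
  if vocab_old.isEmpty then repaired.items
  else
    let id_to_old : PySem.Dict Int String :=
      vocab_old.foldl (fun d p => d.insert p.2 p.1) PySem.Dict.empty
    let max_old_id : Int := (PySem.List.max? id_to_old.keys (fun x => x)).getD 0   -- keys nonempty here
    let used_ids : PySem.Set Int := PySem.Set.ofList repaired.values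
    let holes : List Int :=
      (PySem.List.pyRange 0 (max_old_id + 1) 1).filter
        (fun i => !(PySem.Set.contains used_ids i))
    (holes.foldl (pvFill id_to_old) repaired).items

-- ===== PORT B =====
-- one step of B's single first pass: if tid not in seen: repaired[tok] = tid; seen.add(tid)
def pvBStep (s : PySem.Dict String Int × PySem.Set Int) (p : String × Int) :
    PySem.Dict String Int × PySem.Set Int :=
  if PySem.Set.contains s.2 p.2 then s
  else (s.1.insert p.1 p.2, PySem.Set.add s.2 p.2)

def repair_vocab_new_alt (vocab_new : List (String × Int)) (vocab_old : List (String × Int)) :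
    List (String × Int) :=
  let rs := vocab_new.foldl pvBStep (PySem.Dict.empty, PySem.Set.empty)
  let repaired := rs.1
  if vocab_old.isEmpty then repaired.items
  else
    let id_to_old : PySem.Dict Int String :=
      vocab_old.foldl (fun d p => d.insert p.2 p.1) PySem.Dict.empty
    let max_old_id : Int := (PySem.List.max? id_to_old.keys (fun x => x)).getD 0
    let used_ids : PySem.Set Int := PySem.Set.ofList repaired.values
    ((PySem.List.pyRange 0 (max_old_id + 1) 1).foldl
        (fun r hid => if PySem.Set.contains used_ids hid then r else pvFill id_to_old r hid)
        repaired).items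

-- ===== PRECONDITION & SPEC =====
def Spec_repair_vocab_new (vocab_new : List (String × Int)) (vocab_old : List (String × Int)) (out : List (String × Int)) : Prop := out = repair_vocab_new_alt vocab_new vocab_old
instance (vocab_new : List (String × Int)) (vocab_old : List (String × Int)) (out : List (String × Int)) : Decidable (Spec_repair_vocab_new vocab_new vocab_old out) := by unfold Spec_repair_vocab_new; infer_instance

-- ===== CLAIM (what is proved, stated in full; the proofs are below) =====
def Claim_equal_repair_vocab_new : Prop := ∀ (vocab_new : List (String × Int)) (vocab_old : List (String × Int)), Dom_repair_vocab_new vocab_new vocab_old → Spec_repair_vocab_new vocab_new vocab_old (repair_vocab_new vocab_new vocab_old)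

-- ===== LEMMAS AND PROOFS =====

-- A's second pass, restricted to its `repaired` component, as a function of the group table
def pvExtract (d : PySem.Dict Int (List String)) : PySem.Dict String Int :=
  d.items.foldl (fun r q => r.insert (PySem.List.pyGetD q.2 0 "") q.1) PySem.Dict.empty

lemma pass1_gen (vn : List (String × Int)) :
    ∀ (d : PySem.Dict Int (List String)), d.keys.Nodup → (∀ q ∈ d.items, q.2 ≠ []) →
      pvExtract (vn.foldl pvGroupStep d) = (vn.foldl pvBStep (pvExtract d, d.keys)).1 := by
  induction vn with
  | nil => intro d _ _; rfl
  | cons p rest ih =>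
    intro d hnd hne
    simp only [List.foldl_cons]
    by_cases hc : d.contains p.2 = true
    · -- p.2 is an already-seen id
      have hmem : p.2 ∈ d.keys := (PySem.Dict.contains_iff_mem_keys d p.2).mp hc
      have hb : pvBStep (pvExtract d, d.keys) p = (pvExtract d, d.keys) := by
        unfold pvBStep
        simp [hmem]
      have hmod : pvGroupStep d p = d.insert p.2 (d.getD p.2 [] ++ [p.1]) := rfl
      have hkeys : (pvGroupStep d p).keys = d.keys := by
        rw [hmod, PySem.Dict.keys_insert_of_contains d _ hc]
      have hitems : (pvGroupStep d p).items
          = d.items.map (fun q => if (q.1 == p.2) = true then (p.2, d.getD p.2 [] ++ [p.1]) else q) := by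
        rw [hmod, PySem.Dict.items_insert_of_contains d _ hc]
      have hext : pvExtract (pvGroupStep d p) = pvExtract d := by
        unfold pvExtract
        rw [hitems, List.foldl_map]
        apply PySem.List.foldl_congr_mem
        intro acc q hq
        by_cases h1 : (q.1 == p.2) = true
        · have hq1 : q.1 = p.2 := by simpa using h1
          have hval : d.getD p.2 [] = q.2 := by
            apply PySem.Dict.getD_of_mem_items
            · rw [← hq1]; exact hq
            · exact hnd
          have hq2 : q.2 ≠ [] := hne q hq
          cases hq2' : q.2 with
          | nil => exact absurd hq2' hq2
          | cons a t =>
            rw [if_pos h1]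
            simp only [hval, hq2', List.cons_append, PySem.List.pyGetD_zero_cons, hq1]
        · rw [if_neg h1]
      rw [hb, ← hext, ← hkeys]
      apply ih
      · rw [hkeys]; exact hnd
      · intro q hq
        rw [hitems] at hq
        obtain ⟨q', hq', hmapeq⟩ := List.mem_map.mp hq
        by_cases h1 : (q'.1 == p.2) = true
        · rw [← hmapeq, if_pos h1]; simp
        · rw [← hmapeq, if_neg h1]; exact hne q' hq'
    · -- p.2 is a fresh id
      have hc' : d.contains p.2 = false := by
        cases h : d.contains p.2
        · rfl
        · exact absurd h hc
      have hnm : p.2 ∉ d.keys := fun h => hc ((PySem.Dict.contains_iff_mem_keys d p.2).mpr h)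
      have hb : pvBStep (pvExtract d, d.keys) p
          = ((pvExtract d).insert p.1 p.2, d.keys ++ [p.2]) := by
        unfold pvBStep
        simp [hnm]
      have hmod : pvGroupStep d p = d.insert p.2 [p.1] := by
        show d.insert p.2 (d.getD p.2 [] ++ [p.1]) = d.insert p.2 [p.1]
        rw [PySem.Dict.getD_of_not_contains _ _ hc']
        rfl
      have hitems : (pvGroupStep d p).items = d.items ++ [(p.2, [p.1])] := by
        rw [hmod, PySem.Dict.items_insert_of_not_contains d _ hc']
      have hkeys : (pvGroupStep d p).keys = d.keys ++ [p.2] := by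
        rw [hmod, PySem.Dict.keys_insert_of_not_contains d _ hc']
      have hext : pvExtract (pvGroupStep d p) = (pvExtract d).insert p.1 p.2 := by
        unfold pvExtract
        rw [hitems, List.foldl_append]
        simp [PySem.List.pyGetD_zero_cons]
      rw [hb, ← hext, ← hkeys]
      apply ih
      · rw [hkeys]
        refine List.Nodup.append hnd (by simp) ?_
        intro a ha hb
        simp only [List.mem_singleton] at hb
        exact hnm (hb ▸ ha)
      · intro q hq
        rw [hitems] at hq
        rcases List.mem_append.mp hq with h | h
        · exact hne q h
        · simp at h; rw [h]; simp

lemma pass1 (vn : List (String × Int)) :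
    (((vn.foldl pvGroupStep PySem.Dict.empty).items.foldl pvAStep
        (PySem.Dict.empty, PySem.Dict.empty)).1 : PySem.Dict String Int)
      = (vn.foldl pvBStep (PySem.Dict.empty, PySem.Set.empty)).1 := by
  have h := pass1_gen vn PySem.Dict.empty PySem.Dict.nodup_keys_empty
    (by intro q hq; exact absurd hq (by rw [show (PySem.Dict.empty : PySem.Dict Int (List String)).items = [] from rfl]; simp))
  unfold pvAStep
  rw [PySem.List.foldl_prod_mk
    (f := fun (r : PySem.Dict String Int) (q : Int × List String) =>
      r.insert (PySem.List.pyGetD q.2 0 "") q.1)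
    (g := fun (dup : PySem.Dict Int (List String)) (q : Int × List String) =>
      if 1 < PySem.List.len q.2 then dup.insert q.1 (PySem.List.slice q.2 (some 1) none) else dup)]
  exact h

lemma tail_eq (io : PySem.Dict Int String) (used : PySem.Set Int) (r : PySem.Dict String Int)
    (rng : List Int) :
    (rng.filter (fun i => !(PySem.Set.contains used i))).foldl (pvFill io) r
      = rng.foldl (fun r hid => if PySem.Set.contains used hid then r else pvFill io r hid) r := by
  rw [← PySem.List.foldl_if_eq_foldl_filter (fun i => !(PySem.Set.contains used i)) (pvFill io) rng r]
  apply PySem.List.foldl_congr_mem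
  intro acc x _
  cases PySem.Set.contains used x <;> simp

-- ===== VERDICT (by name: the statement is the Claim_ definition above) =====
theorem repair_vocab_new_spec : Claim_equal_repair_vocab_new := by
  intro vn vo _
  unfold Spec_repair_vocab_new repair_vocab_new repair_vocab_new_alt
  simp only [pass1 vn, tail_eq]
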